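-- pv_equiv track=rewrite | github.com/AlexeyBudyak/CodeWars | python-kata-6kyu/sort-strings-by-most-contiguous-vowels.py | sort_strings_by_vowels
-- ===== SOURCE A (Python) =====
-- def sort_strings_by_vowels(seq):
--     dict = {}
--     for el in seq:
--         dict[el] = len(sorted(''.join(str(int(letter in 'aeouiAEOUI')) for letter in el).split('0'))[-1])
--     i = 0
--     while i < len(seq) -1:
--         if dict[seq[i+1]] > dict[seq[i]]:
--             [seq[i],seq[i+1]] = [seq[i+1],seq[i]]
--             i = 0
--         else: i += 1
--     return seq
-- ===== SOURCE B (Python) =====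
-- def sort_strings_by_vowels(seq):
--     # Bucket strategy: group strings by their longest contiguous vowel run,
--     # then emit the buckets in descending key order (stable). Mutates seq in
--     # place (seq[:] = ...) and returns it, like the original.
--     vowels = set('aeiouAEIOU')
--
--     def longest_run(s):
--         best = cur = 0
--         for ch in s:
--             cur = cur + 1 if ch in vowels else 0
--             best = max(best, cur)
--         return best
--
--     keys = [longest_run(s) for s in seq]
--     order = sorted(set(keys), reverse=True)
--     out = []
--     for v in order:
--         out.extend(s for s, k in zip(seq, keys) if k == v)
--     seq[:] = out
--     return seq
-- ===== Notes on version B (the rewrite author's own statement) =====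
-- stated objective: faster
-- what changed: A recomputes each string's longest-vowel-run key into a dict and then sorts by a restart-from-zero adjacent-swap bubble loop; B computes each key with a single running-max pass and buckets the strings by key, emitting buckets in descending key order (stable, in-place via seq[:]=...).
import Mathlib
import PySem

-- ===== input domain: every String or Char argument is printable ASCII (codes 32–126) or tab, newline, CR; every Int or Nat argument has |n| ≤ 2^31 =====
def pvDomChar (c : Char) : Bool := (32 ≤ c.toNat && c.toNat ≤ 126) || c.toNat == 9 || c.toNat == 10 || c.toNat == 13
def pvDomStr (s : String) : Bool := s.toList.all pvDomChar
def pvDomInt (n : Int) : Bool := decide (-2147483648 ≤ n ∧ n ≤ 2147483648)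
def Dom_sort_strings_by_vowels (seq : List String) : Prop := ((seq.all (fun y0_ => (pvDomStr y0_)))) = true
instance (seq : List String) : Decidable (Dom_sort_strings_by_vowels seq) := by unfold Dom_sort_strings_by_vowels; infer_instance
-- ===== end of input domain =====

-- B replaces A's restart-on-swap bubble sort with buckets grouped by the longest-vowel-run key,
-- emitted in descending key order; same return value (both also mutate seq in place in Python).

-- ===== PORT A =====
-- A's key expression: len(sorted(''.join(str(int(letter in 'aeouiAEOUI')) for letter in el).split('0'))[-1])
-- sep "0" is nonempty so split? never returns none, and split always yields at least one piece
-- so index -1 never raises: both getD defaults are unreachable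
def pvKeyA (el : String) : Int :=
  PySem.Str.len ((PySem.List.pyGet?
    (PySem.List.sorted
      ((PySem.Str.split?
        (PySem.Str.join "" (el.toList.map (fun letter =>
          PySem.Int.toStr (if PySem.Str.isIn (String.ofList [letter]) "aeouiAEOUI" then 1 else 0))))
        "0").getD [])
      (fun x => x) false)
    (-1)).getD "")

-- dict = {}; for el in seq: dict[el] = <key expression>
def pvDictA (seq : List String) : PySem.Dict String Int :=
  seq.foldl (fun d el => d.insert el (pvKeyA el)) PySem.Dict.empty

-- inversion count of a key list w.r.t. descending order (termination measure only)
def pvInv : List Int → Nat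
  | [] => 0
  | a :: t => t.countP (fun b => decide (a < b)) + pvInv t

theorem pvInv_swap (xs : List Int) (a b : Int) (ys : List Int) (h : a < b) :
    pvInv (xs ++ b :: a :: ys) < pvInv (xs ++ a :: b :: ys) := by
  induction xs with
  | nil =>
    simp only [List.nil_append, pvInv, List.countP_cons]
    have h1 : decide (a < b) = true := by simpa using h
    have h2 : decide (b < a) = false := by simp; omega
    simp [h1, h2]
    omega
  | cons x xs ih =>
    simp only [List.cons_append, pvInv]
    have hperm : (xs ++ b :: a :: ys).Perm (xs ++ a :: b :: ys) :=
      List.Perm.append_left xs (List.Perm.swap a b ys)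
    rw [hperm.countP_eq]
    omega

theorem pv_set_swap {α : Type} (dflt : α) (l : List α) (i : Nat) (h : i + 1 < l.length) :
    (l.set i (l.getD (i+1) dflt)).set (i+1) (l.getD i dflt)
      = l.take i ++ l.getD (i+1) dflt :: l.getD i dflt :: l.drop (i+2) := by
  induction l generalizing i with
  | nil => simp at h
  | cons x t ih =>
    cases i with
    | zero =>
      simp only [List.length_cons] at h
      cases t with
      | nil => simp at h
      | cons y t' => simp [List.getD]
    | succ j =>
      simp only [List.length_cons] at h
      have := ih j (by omega)
      simp only [List.set_cons_succ, List.getD_cons_succ, List.take_succ_cons,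
        List.drop_succ_cons, List.cons_append]
      exact congrArg (x :: ·) this

theorem pv_decomp {α : Type} (dflt : α) (l : List α) (i : Nat) (h : i + 1 < l.length) :
    l = l.take i ++ l.getD i dflt :: l.getD (i+1) dflt :: l.drop (i+2) := by
  induction l generalizing i with
  | nil => simp at h
  | cons x t ih =>
    cases i with
    | zero =>
      simp at h
      cases t with
      | nil => simp at h
      | cons y t' => simp [List.getD]
    | succ j =>
      simp only [List.length_cons] at h
      have := ih j (by omega)
      simp only [List.take_succ_cons, List.drop_succ_cons, List.getD_cons_succ, List.cons_append]
      exact congrArg (x :: ·) this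

-- the while loop; i = 0, i += 1 only, so Nat is exact for Python's int i here
def pvLoopA (d : PySem.Dict String Int) (l : List String) (i : Nat) : List String :=
  if hlt : i < l.length - 1 then
    if d.getD (l.getD (i+1) "") 0 > d.getD (l.getD i "") 0 then
      pvLoopA d ((l.set i (l.getD (i+1) "")).set (i+1) (l.getD i "")) 0
    else
      pvLoopA d l (i+1)
  else l
termination_by pvInv (l.map (fun s => d.getD s 0)) * l.length + (l.length - i)
decreasing_by
  · have h1 : i + 1 < l.length := by omega
    rw [pv_set_swap "" l i h1]
    have hlen : (l.take i ++ l.getD (i+1) "" :: l.getD i "" :: l.drop (i+2)).length = l.length := by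
      simp; omega
    rw [hlen]
    have hinv : pvInv ((l.take i ++ l.getD (i+1) "" :: l.getD i "" :: l.drop (i+2)).map
        (fun s => d.getD s 0)) < pvInv (l.map (fun s => d.getD s 0)) := by
      have := pvInv_swap ((l.take i).map (fun s => d.getD s 0))
        (d.getD (l.getD i "") 0) (d.getD (l.getD (i+1) "") 0)
        ((l.drop (i+2)).map (fun s => d.getD s 0)) (by omega)
      calc pvInv ((l.take i ++ l.getD (i+1) "" :: l.getD i "" :: l.drop (i+2)).map
              (fun s => d.getD s 0))
          = pvInv ((l.take i).map (fun s => d.getD s 0) ++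
              d.getD (l.getD (i+1) "") 0 :: d.getD (l.getD i "") 0 ::
              (l.drop (i+2)).map (fun s => d.getD s 0)) := by simp
        _ < pvInv ((l.take i).map (fun s => d.getD s 0) ++
              d.getD (l.getD i "") 0 :: d.getD (l.getD (i+1) "") 0 ::
              (l.drop (i+2)).map (fun s => d.getD s 0)) := this
        _ = pvInv (l.map (fun s => d.getD s 0)) := by
              conv_rhs => rw [pv_decomp "" l i h1]
              simp
    have hmul : (pvInv ((l.take i ++ l.getD (i+1) "" :: l.getD i "" :: l.drop (i+2)).map
        (fun s => d.getD s 0)) + 1) * l.length ≤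
        pvInv (l.map (fun s => d.getD s 0)) * l.length :=
      Nat.mul_le_mul_right _ (by omega)
    have hmul' : pvInv ((l.take i ++ l.getD (i+1) "" :: l.getD i "" :: l.drop (i+2)).map
        (fun s => d.getD s 0)) * l.length + l.length ≤
        pvInv (l.map (fun s => d.getD s 0)) * l.length := by
      calc _ = (pvInv ((l.take i ++ l.getD (i+1) "" :: l.getD i "" :: l.drop (i+2)).map
              (fun s => d.getD s 0)) + 1) * l.length := by ring
        _ ≤ _ := hmul
    have h2 : 1 ≤ l.length - i := by omega
    rw [Nat.sub_zero]
    linarith [hmul', h2]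
  · omega

def sort_strings_by_vowels (seq : List String) : List String :=
  pvLoopA (pvDictA seq) seq 0

-- ===== PORT B =====
-- longest contiguous vowel run via a single running-max pass
def pvStepB (bc : Int × Int) (ch : Char) : Int × Int :=
  let cur := if PySem.Set.contains (PySem.Set.ofList "aeiouAEIOU".toList) ch then bc.2 + 1 else 0
  (max bc.1 cur, cur)

def pvRunB (s : String) : Int :=
  (s.toList.foldl pvStepB (0, 0)).1

def sort_strings_by_vowels_alt (seq : List String) : List String :=
  let keys := seq.map pvRunB
  let order := PySem.List.sorted (PySem.Set.ofList keys) (fun x => x) true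
  order.foldl (fun out v =>
    out ++ ((seq.zip keys).filter (fun p => p.2 == v)).map Prod.fst) []

-- ===== PRECONDITION & SPEC =====
def Spec_sort_strings_by_vowels (seq : List String) (out : List String) : Prop := out = sort_strings_by_vowels_alt seq
instance (seq : List String) (out : List String) : Decidable (Spec_sort_strings_by_vowels seq out) := by unfold Spec_sort_strings_by_vowels; infer_instance

-- ===== CLAIM (what is proved, stated in full; the proofs are below) =====
def Claim_equal_sort_strings_by_vowels : Prop := ∀ (seq : List String), Dom_sort_strings_by_vowels seq → Spec_sort_strings_by_vowels seq (sort_strings_by_vowels seq)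

-- ===== LEMMAS AND PROOFS =====

-- ---------- Part I: the two key functions agree ----------

-- structural model of "cs.split('0')" carrying the current (reversed-not-needed) piece
def pvSp (pre : List Char) : List Char → List (List Char)
  | [] => [pre]
  | c :: t => if c = '0' then pre :: pvSp [] t else pvSp (pre ++ [c]) t

theorem pv_vowel_eq (c : Char) :
    PySem.Str.isIn (String.ofList [c]) "aeouiAEOUI"
      = PySem.Set.contains (PySem.Set.ofList "aeiouAEIOU".toList) c := by
  have h3 : c ∈ "aeouiAEOUI".toList ↔ c ∈ "aeiouAEIOU".toList := by
    have e1 : "aeouiAEOUI".toList = ['a','e','o','u','i','A','E','O','U','I'] := by decide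
    have e2 : "aeiouAEIOU".toList = ['a','e','i','o','u','A','E','I','O','U'] := by decide
    rw [e1, e2]
    simp only [List.mem_cons, List.not_mem_nil]
    tauto
  have h1 : PySem.Str.isIn (String.ofList [c]) "aeouiAEOUI" = true ↔ c ∈ "aeouiAEOUI".toList := by
    rw [PySem.Str.isIn_iff_infix]
    constructor
    · intro h; exact h.mem (by simp)
    · intro h
      obtain ⟨l1, l2, hm⟩ := List.append_of_mem h
      rw [hm]
      exact ⟨l1, l2, by simp⟩
  have h2 : PySem.Set.contains (PySem.Set.ofList "aeiouAEIOU".toList) c = true ↔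
      c ∈ "aeiouAEIOU".toList := by
    simp only [PySem.Set.contains, List.contains_iff_mem, PySem.Set.mem_ofList]
  rw [Bool.eq_iff_iff, h1, h2]
  exact h3

def pvBit (c : Char) : Char :=
  if PySem.Str.isIn (String.ofList [c]) "aeouiAEOUI" then '1' else '0'

def pvMaxLen (ps : List (List Char)) : Int :=
  ps.foldr (fun p acc => max (p.length : Int) acc) 0

theorem pvMaxLen_nonneg (ps : List (List Char)) : 0 ≤ pvMaxLen ps := by
  induction ps with
  | nil => simp [pvMaxLen]
  | cons p t ih => simp only [pvMaxLen, List.foldr_cons] at *; exact le_trans ih (le_max_right _ _)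

theorem pvMaxLen_cons (p : List Char) (t : List (List Char)) :
    pvMaxLen (p :: t) = max (p.length : Int) (pvMaxLen t) := rfl

theorem le_pvMaxLen (ps : List (List Char)) (p : List Char) (h : p ∈ ps) :
    (p.length : Int) ≤ pvMaxLen ps := by
  induction ps with
  | nil => simp at h
  | cons q t ih =>
    rw [pvMaxLen_cons]
    rcases List.mem_cons.mp h with rfl | h
    · exact le_max_left _ _
    · exact le_trans (ih h) (le_max_right _ _)

theorem pvMaxLen_le (ps : List (List Char)) (K : Int) (h0 : 0 ≤ K)
    (h : ∀ p ∈ ps, (p.length : Int) ≤ K) : pvMaxLen ps ≤ K := by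
  induction ps with
  | nil => simpa [pvMaxLen]
  | cons q t ih =>
    rw [pvMaxLen_cons]
    exact max_le (h q List.mem_cons_self) (ih (fun p hp => h p (List.mem_cons_of_mem _ hp)))

theorem pv_pyGet_neg_one {α : Type} (xs : List α) (h : xs ≠ []) :
    PySem.List.pyGet? xs (-1) = some (xs.getLast h) := by
  have hn : 0 < xs.length := List.length_pos_iff.mpr h
  have h1 : ¬ ((0:Int) ≤ -1) := by omega
  have h2 : -(xs.length : Int) ≤ -1 := by omega
  simp only [PySem.List.pyGet?, PySem.List.pyIdx?, h1, if_false, h2, if_true, Option.bind_some]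
  have h3 : xs.length - (-(-1:Int)).toNat = xs.length - 1 := by norm_num
  rw [h3, List.getLast_eq_getElem h, List.getElem?_eq_getElem (by omega)]

theorem pv_splitOn_go (l : List Char) :
    ∀ (fuel : Nat), l.length ≤ fuel → ∀ (cur : List Char) (acc : List (List Char)),
    PySem.Chars.splitOn.go ['0'] fuel l cur acc = acc.reverse ++ pvSp cur.reverse l := by
  induction l with
  | nil =>
    intro fuel _ cur acc
    cases fuel with
    | zero => simp [PySem.Chars.splitOn.go, pvSp]
    | succ f => simp [PySem.Chars.splitOn.go, pvSp]
  | cons c rest ih =>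
    intro fuel hf cur acc
    cases fuel with
    | zero => simp at hf
    | succ f =>
      by_cases hc : c = '0'
      · subst hc
        have hpre : List.isPrefixOf ['0'] ('0' :: rest) = true := by
          simp [List.isPrefixOf]
        rw [PySem.Chars.splitOn.go]
        simp only [hpre, if_true]
        have : List.drop (['0'] : List Char).length ('0' :: rest) = rest := by simp
        rw [this, ih f (by simpa using hf) [] (cur.reverse :: acc)]
        simp [pvSp]
      · have hpre : List.isPrefixOf ['0'] (c :: rest) = false := by
          simp [List.isPrefixOf]
          exact fun h => absurd h.symm hc
        rw [PySem.Chars.splitOn.go]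
        simp only [hpre, if_false]
        rw [ih f (by simpa using hf) (c :: cur) acc]
        simp only [pvSp, hc, if_false]
        simp

theorem pv_splitOn_eq (l : List Char) :
    PySem.Chars.splitOn l ['0'] = pvSp [] l := by
  rw [PySem.Chars.splitOn, pv_splitOn_go l (l.length + 1) (by omega) [] []]
  simp

theorem pvSp_ne_nil (pre : List Char) (cs : List Char) : pvSp pre cs ≠ [] := by
  cases cs with
  | nil => simp [pvSp]
  | cons c t =>
    simp only [pvSp]
    split
    · simp
    · exact pvSp_ne_nil _ t

theorem pvSp_rep (cs : List Char) (h01 : ∀ c ∈ cs, c = '0' ∨ c = '1') :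
    ∀ m, ∀ p ∈ pvSp (List.replicate m '1') cs, ∃ k, p = List.replicate k '1' := by
  induction cs with
  | nil =>
    intro m p hp
    simp only [pvSp, List.mem_singleton] at hp
    exact ⟨m, hp⟩
  | cons c t ih =>
    have h01' : ∀ c ∈ t, c = '0' ∨ c = '1' := fun x hx => h01 x (List.mem_cons_of_mem _ hx)
    intro m p hp
    rcases h01 c List.mem_cons_self with rfl | rfl
    · simp only [pvSp, if_pos rfl] at hp
      rcases List.mem_cons.mp hp with rfl | hp
      · exact ⟨m, rfl⟩
      · exact ih h01' 0 p hp
    · have hne : ('1' : Char) ≠ '0' := by decide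
      simp only [pvSp, hne, if_false] at hp
      rw [← List.replicate_succ'] at hp
      exact ih h01' (m+1) p hp

theorem pvSp_pre_le (cs : List Char) : ∀ (pre : List Char),
    (pre.length : Int) ≤ pvMaxLen (pvSp pre cs) := by
  induction cs with
  | nil => intro pre; simp [pvSp, pvMaxLen]
  | cons c t ih =>
    intro pre
    by_cases hc : c = '0'
    · subst hc
      simp only [pvSp, if_pos rfl, pvMaxLen_cons]
      exact le_max_left _ _
    · simp only [pvSp, hc, if_false]
      calc (pre.length : Int) ≤ ((pre ++ [c]).length : Int) := by simp
        _ ≤ pvMaxLen (pvSp (pre ++ [c]) t) := ih _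

theorem pv_rep_toList_lt (m n : Nat) (h : m < n) :
    (List.replicate m '1' : List Char) < List.replicate n '1' := by
  show (List.replicate m '1').lt (List.replicate n '1')
  rw [List.lt_iff_lex_lt]
  induction m generalizing n with
  | zero =>
    cases n with
    | zero => omega
    | succ k => rw [List.replicate_succ]; exact List.Lex.nil
  | succ j ih =>
    cases n with
    | zero => omega
    | succ k =>
      rw [List.replicate_succ, List.replicate_succ (n := k)]
      exact List.Lex.cons (ih k (by omega))

theorem pv_fold_sp (cs : List Char) : ∀ (best cur : Int), 0 ≤ cur → cur ≤ best →
    (cs.foldl pvStepB (best, cur)).1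
    = max best (pvMaxLen (pvSp (List.replicate cur.toNat '1') (cs.map pvBit))) := by
  induction cs with
  | nil =>
    intro best cur h0 h1
    simp only [List.foldl_nil, List.map_nil, pvSp, pvMaxLen_cons]
    have h2 : pvMaxLen [] = 0 := rfl
    have hlen : ((List.replicate cur.toNat '1').length : Int) = cur := by
      simp [Int.toNat_of_nonneg h0]
    rw [h2, hlen, max_eq_left h0, max_eq_left h1]
  | cons c t ih =>
    intro best cur h0 h1
    simp only [List.foldl_cons, List.map_cons]
    by_cases hv : PySem.Set.contains (PySem.Set.ofList "aeiouAEIOU".toList) c = true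
    · have hbit : pvBit c = '1' := by
        rw [pvBit, pv_vowel_eq c, hv]
        simp
      have hstep : pvStepB (best, cur) c = (max best (cur + 1), cur + 1) := by
        simp only [pvStepB, hv, if_true]
      rw [hstep, ih (max best (cur+1)) (cur+1) (by omega) (le_max_right _ _)]
      have hone : ('1' : Char) ≠ '0' := by decide
      rw [hbit]
      have hsp : pvSp (List.replicate cur.toNat '1') ('1' :: t.map pvBit)
          = pvSp (List.replicate (cur+1).toNat '1') (t.map pvBit) := by
        simp only [pvSp, hone, if_false]
        rw [← List.replicate_succ']
        congr 2
        omega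
      rw [hsp]
      have hle : cur + 1 ≤ pvMaxLen (pvSp (List.replicate (cur+1).toNat '1') (t.map pvBit)) := by
        have hge := pvSp_pre_le (t.map pvBit) (List.replicate (cur+1).toNat '1')
        have hlen : (((List.replicate (cur+1).toNat '1').length : Nat) : Int) = cur + 1 := by
          simp [Int.toNat_of_nonneg (by omega : (0:Int) ≤ cur + 1)]
        rw [hlen] at hge
        exact hge
      rw [max_assoc, max_eq_right hle]
    · have hbit : pvBit c = '0' := by
        rw [pvBit, pv_vowel_eq c]
        simp only [Bool.not_eq_true] at hv
        rw [hv]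
        simp
      have hstep : pvStepB (best, cur) c = (max best 0, 0) := by
        have hv' : PySem.Set.contains (PySem.Set.ofList "aeiouAEIOU".toList) c = false :=
          Bool.not_eq_true _ ▸ eq_false_of_ne_true hv
        simp only [pvStepB, hv', Bool.false_eq_true, if_false]
      have hb0 : max best (0:Int) = best := max_eq_left (le_trans h0 h1)
      rw [hstep, hb0, ih best 0 le_rfl (le_trans h0 h1)]
      rw [hbit]
      have hsp : pvSp (List.replicate cur.toNat '1') ('0' :: t.map pvBit)
          = List.replicate cur.toNat '1' :: pvSp [] (t.map pvBit) := by
        simp [pvSp]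
      rw [hsp, pvMaxLen_cons]
      have hlen : ((List.replicate cur.toNat '1').length : Int) = cur := by
        simp [Int.toNat_of_nonneg h0]
      rw [hlen]
      have hz : List.replicate (0:Int).toNat '1' = ([] : List Char) := by simp
      rw [hz]
      rw [← max_assoc, max_eq_left h1]

theorem pv_last_maxlen (ps : List String)
    (hrep : ∀ p ∈ ps, ∃ k, p.toList = List.replicate k '1') (hne : ps ≠ []) :
    PySem.Str.len ((PySem.List.pyGet? (PySem.List.sorted ps (fun x => x) false) (-1)).getD "")
      = pvMaxLen (ps.map String.toList) := by
  have hsne : PySem.List.sorted ps (fun x => x) false ≠ [] := by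
    intro h
    exact hne ((PySem.List.sorted_eq_nil_iff _ _ _).mp h)
  rw [pv_pyGet_neg_one _ hsne, Option.getD_some]
  have hLmem : (PySem.List.sorted ps (fun x => x) false).getLast hsne ∈ ps :=
    (PySem.List.mem_sorted ps _ false _).mp (List.getLast_mem hsne)
  obtain ⟨kl, hkl⟩ := hrep _ hLmem
  have hmax : ∀ x ∈ ps, x ≤ (PySem.List.sorted ps (fun x => x) false).getLast hsne := by
    intro x hx
    have hx' : x ∈ PySem.List.sorted ps (fun x => x) false :=
      (PySem.List.mem_sorted ps _ false x).mpr hx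
    obtain ⟨p, hp, hpe⟩ := List.mem_iff_getElem.mp hx'
    have hlp : 0 < (PySem.List.sorted ps (fun x => x) false).length := List.length_pos_iff.mpr hsne
    have hmono := PySem.List.key_sorted_getElem_mono ps (fun x => x)
      (p := p) (q := (PySem.List.sorted ps (fun x => x) false).length - 1) (by omega) (by omega)
    rw [List.getLast_eq_getElem hsne, ← hpe]
    exact hmono
  have hlenle : ∀ x ∈ ps, ∀ k, x.toList = List.replicate k '1' → k ≤ kl := by
    intro x hx k hk
    by_contra hgt
    push_neg at hgt
    have hlt : (PySem.List.sorted ps (fun x => x) false).getLast hsne < x := by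
      rw [String.lt_iff_toList_lt, hkl, hk]
      exact pv_rep_toList_lt kl k hgt
    exact absurd (hmax x hx) (not_le.mpr hlt)
  have h1 : PySem.Str.len ((PySem.List.sorted ps (fun x => x) false).getLast hsne) = (kl : Int) := by
    rw [PySem.Str.len_eq, hkl]; simp
  rw [h1]
  apply le_antisymm
  · have hle := le_pvMaxLen (ps.map String.toList) _ (List.mem_map_of_mem hLmem)
    rw [hkl] at hle
    simpa using hle
  · apply pvMaxLen_le _ _ (by exact_mod_cast Nat.zero_le kl)
    intro p hp
    obtain ⟨x, hx, rfl⟩ := List.mem_map.mp hp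
    obtain ⟨k, hk⟩ := hrep x hx
    rw [hk]
    simpa using Int.ofNat_le.mpr (hlenle x hx k hk)

theorem pv_joined (cs : List Char) :
    (PySem.Str.join "" (cs.map (fun letter =>
      PySem.Int.toStr (if PySem.Str.isIn (String.ofList [letter]) "aeouiAEOUI" then 1 else 0)))).toList
    = cs.map pvBit := by
  simp only [PySem.Str.join, String.toList_ofList]
  have h0 : "".toList = ([] : List Char) := rfl
  rw [h0, List.map_map]
  have hmap : (String.toList ∘ fun letter =>
      PySem.Int.toStr (if PySem.Str.isIn (String.ofList [letter]) "aeouiAEOUI" then 1 else 0))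
      = fun c => [pvBit c] := by
    funext c
    simp only [Function.comp]
    by_cases h : PySem.Str.isIn (String.ofList [c]) "aeouiAEOUI" = true
    · rw [if_pos h, pvBit, if_pos h]
      decide
    · rw [if_neg h, pvBit, if_neg h]
      decide
  rw [hmap]
  have hmap2 : cs.map (fun c => [pvBit c]) = (cs.map pvBit).map (fun c => [c]) := by
    rw [List.map_map]
    rfl
  rw [hmap2, PySem.Chars.join_nil_singletons]

theorem pvBit_01 (cs : List Char) : ∀ c ∈ cs.map pvBit, c = '0' ∨ c = '1' := by
  intro c hc
  obtain ⟨x, _, rfl⟩ := List.mem_map.mp hc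
  by_cases h : PySem.Str.isIn (String.ofList [x]) "aeouiAEOUI" = true
  · right; rw [pvBit, if_pos h]
  · left; rw [pvBit, if_neg h]

theorem pvKey_eq (el : String) : pvKeyA el = pvRunB el := by
  unfold pvKeyA
  have hjoin := pv_joined el.toList
  have hchars : PySem.Chars.split?
      ((PySem.Str.join "" (el.toList.map (fun letter =>
        PySem.Int.toStr (if PySem.Str.isIn (String.ofList [letter]) "aeouiAEOUI" then 1 else 0)))).toList)
      ("0".toList) = some (pvSp [] (el.toList.map pvBit)) := by
    rw [hjoin]
    have h1 : "0".toList = ['0'] := rfl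
    rw [h1, PySem.Chars.split?]
    simp [pv_splitOn_eq]
  have hopt := PySem.Str.split?_map
    (PySem.Str.join "" (el.toList.map (fun letter =>
      PySem.Int.toStr (if PySem.Str.isIn (String.ofList [letter]) "aeouiAEOUI" then 1 else 0)))) "0"
  rw [hchars] at hopt
  cases hsp : PySem.Str.split?
      (PySem.Str.join "" (el.toList.map (fun letter =>
        PySem.Int.toStr (if PySem.Str.isIn (String.ofList [letter]) "aeouiAEOUI" then 1 else 0)))) "0" with
  | none => rw [hsp] at hopt; simp at hopt
  | some ps =>
    rw [hsp] at hopt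
    simp only [Option.map_some, Option.some.injEq] at hopt
    rw [Option.getD_some]
    have hrep : ∀ p ∈ ps, ∃ k, p.toList = List.replicate k '1' := by
      intro p hp
      have : p.toList ∈ pvSp [] (el.toList.map pvBit) := by
        rw [← hopt]
        exact List.mem_map_of_mem hp
      have hz : pvSp [] (el.toList.map pvBit)
          = pvSp (List.replicate 0 '1') (el.toList.map pvBit) := rfl
      rw [hz] at this
      exact pvSp_rep (el.toList.map pvBit) (pvBit_01 el.toList) 0 p.toList this
    have hne : ps ≠ [] := by
      intro h
      rw [h] at hopt
      simp only [List.map_nil] at hopt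
      exact pvSp_ne_nil [] (el.toList.map pvBit) hopt.symm
    rw [pv_last_maxlen ps hrep hne, hopt]
    rw [pvRunB, pv_fold_sp el.toList 0 0 le_rfl le_rfl]
    have hz2 : List.replicate (0:Int).toNat '1' = ([] : List Char) := rfl
    rw [hz2, max_eq_right (pvMaxLen_nonneg _)]

-- ---------- Part II: canonical bucket form ----------

theorem pvDict_getD_foldl (g : String → Int) (l : List String) (x : String)
    (d : PySem.Dict String Int) (h : x ∈ l ∨ d.get? x = some (g x)) :
    (l.foldl (fun d el => d.insert el (g el)) d).getD x 0 = g x := by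
  induction l generalizing d with
  | nil =>
    rcases h with h | h
    · simp at h
    · simp [PySem.Dict.getD, h]
  | cons e t ih =>
    simp only [List.foldl_cons]
    apply ih
    by_cases hx : x = e
    · subst hx
      right; exact PySem.Dict.get?_insert_self d x (g x)
    · rcases h with h | h
      · rcases List.mem_cons.mp h with h | h
        · exact absurd h hx
        · left; exact h
      · right; rw [PySem.Dict.get?_insert_of_ne d (g e) hx]; exact h

theorem pv_zip_filter (g : String → Int) (l : List String) (v : Int) :
    ((l.zip (l.map g)).filter (fun p => p.2 == v)).map Prod.fst
      = l.filter (fun s => g s == v) := by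
  induction l with
  | nil => simp
  | cons a t ih =>
    simp only [List.map_cons, List.zip_cons_cons, List.filter_cons]
    by_cases h : g a == v
    · simp only [h, if_pos rfl]
      simp [ih, h]
    · simp only [List.filter_cons] at *
      simp [h, ih]

theorem pv_sorted_ofList_perm (m1 m2 : List Int) (h : m1.Perm m2) :
    PySem.List.sorted (PySem.Set.ofList m1) (fun x => x) true
      = PySem.List.sorted (PySem.Set.ofList m2) (fun x => x) true := by
  have hperm1 : (PySem.List.sorted (PySem.Set.ofList m1) (fun x => x) true).Perm
      (PySem.Set.ofList m1) := PySem.List.sorted_perm _ _ _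
  have hnd : (PySem.List.sorted (PySem.Set.ofList m1) (fun x => x) true).Nodup :=
    (hperm1.nodup_iff).mpr (PySem.Set.nodup_ofList m1)
  have hpw : List.Pairwise (fun a b => b ≤ a)
      (PySem.List.sorted (PySem.Set.ofList m1) (fun x => x) true) :=
    PySem.List.sorted_pairwise_rev _ _
  have hgt : List.Pairwise (fun a b => b < a)
      (PySem.List.sorted (PySem.Set.ofList m1) (fun x => x) true) := by
    refine (hpw.and hnd).imp ?_
    rintro a b ⟨hle, hne⟩
    exact lt_of_le_of_ne hle (Ne.symm hne)
  have hperm2 : (PySem.List.sorted (PySem.Set.ofList m1) (fun x => x) true).Perm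
      (PySem.Set.ofList m2) := by
    refine hperm1.trans ?_
    rw [List.perm_ext_iff_of_nodup (PySem.Set.nodup_ofList m1) (PySem.Set.nodup_ofList m2)]
    intro a
    rw [PySem.Set.mem_ofList, PySem.Set.mem_ofList]
    exact h.mem_iff
  exact (PySem.List.sorted_rev_eq_of_perm_of_pairwise_gt (PySem.Set.ofList m2) _ _ hperm2 hgt).symm

theorem pv_filter_swap (p : String → Bool) (xs : List String) (a b : String)
    (ys : List String) (h : ¬(p a = true ∧ p b = true)) :
    (xs ++ b :: a :: ys).filter p = (xs ++ a :: b :: ys).filter p := by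
  simp only [List.filter_append, List.filter_cons]
  by_cases ha : p a = true <;> by_cases hb : p b = true <;> simp [ha, hb] at * <;> tauto


def pvC (l : List String) : List String :=
  (PySem.List.sorted (PySem.Set.ofList (l.map pvRunB)) (fun x => x) true).flatMap
    (fun v => l.filter (fun s => pvRunB s == v))

theorem pvC_swap (xs : List String) (a b : String) (ys : List String)
    (h : pvRunB a ≠ pvRunB b) :
    pvC (xs ++ b :: a :: ys) = pvC (xs ++ a :: b :: ys) := by
  unfold pvC
  have hperm : ((xs ++ b :: a :: ys).map pvRunB).Perm ((xs ++ a :: b :: ys).map pvRunB) :=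
    ((List.Perm.append_left xs (List.Perm.swap b a ys)).map pvRunB).symm
  rw [pv_sorted_ofList_perm _ _ hperm]
  have hfun : (fun v => (xs ++ b :: a :: ys).filter (fun s => pvRunB s == v))
      = (fun v => (xs ++ a :: b :: ys).filter (fun s => pvRunB s == v)) := by
    funext v
    apply pv_filter_swap
    rintro ⟨ha, hb⟩
    exact h ((beq_iff_eq.mp ha).trans (beq_iff_eq.mp hb).symm)
  rw [hfun]


theorem pv_flatMap_congr (f f' : Int → List String) (vs : List Int)
    (h : ∀ v ∈ vs, f v = f' v) : vs.flatMap f = vs.flatMap f' := by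
  induction vs with
  | nil => rfl
  | cons v t ih =>
    simp only [List.flatMap_cons]
    rw [h v (List.mem_cons_self), ih (fun x hx => h x (List.mem_cons_of_mem v hx))]

theorem pv_dropWhile_head_false (p : String → Bool) (l : List String) (h2 : String)
    (t2 : List String) (h : l.dropWhile p = h2 :: t2) : p h2 = false := by
  have hne : l.dropWhile p ≠ [] := by simp [h]
  simpa [h] using List.head_dropWhile_not p hne

theorem pv_dropWhile_lt (g : String → Int) (l : List String) (v : Int)
    (hpw : List.Pairwise (fun a b => g b ≤ g a) l)
    (hmax : ∀ w ∈ l.map g, w ≤ v) :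
    ∀ s ∈ l.dropWhile (fun s => g s == v), g s < v := by
  intro s hs
  have hne : l.dropWhile (fun s => g s == v) ≠ [] := List.ne_nil_of_mem hs
  obtain ⟨h2, t2, hdw⟩ : ∃ h2 t2, l.dropWhile (fun s => g s == v) = h2 :: t2 := by
    cases hd : l.dropWhile (fun s => g s == v) with
    | nil => exact absurd hd hne
    | cons a b => exact ⟨a, b, rfl⟩
  have hph2 : (g h2 == v) = false := pv_dropWhile_head_false _ l h2 t2 hdw
  have hne2 : g h2 ≠ v := by
    intro hh
    rw [hh] at hph2
    simp at hph2
  have hle2 : g h2 ≤ v := by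
    apply hmax
    refine List.mem_map_of_mem ?_
    exact (List.dropWhile_sublist _).mem (by rw [hdw]; exact List.mem_cons_self)
  have hlt2 : g h2 < v := lt_of_le_of_ne hle2 hne2
  have hpw2 : List.Pairwise (fun a b => g b ≤ g a) (h2 :: t2) :=
    hdw ▸ (hpw.sublist (List.dropWhile_sublist _))
  rw [hdw] at hs
  rcases List.mem_cons.mp hs with rfl | h
  · exact hlt2
  · exact lt_of_le_of_lt (List.rel_of_pairwise_cons hpw2 h) hlt2

theorem pv_flatMap_filter (g : String → Int) (vs : List Int) (l : List String)
    (hl : List.Pairwise (fun a b => g b ≤ g a) l)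
    (hvs : List.Pairwise (fun a b => b < a) vs)
    (hmem : ∀ v, v ∈ vs ↔ v ∈ l.map g) :
    vs.flatMap (fun v => l.filter (fun s => g s == v)) = l := by
  induction vs generalizing l with
  | nil =>
    have hmg : l.map g = [] := by
      rw [List.eq_nil_iff_forall_not_mem]
      intro v hv
      exact (List.not_mem_nil) ((hmem v).mpr hv)
    have : l = [] := by simpa using hmg
    simp [this]
  | cons v vs' ih =>
    have hvl : v ∈ l.map g := (hmem v).mp List.mem_cons_self
    have hv_max : ∀ w ∈ l.map g, w ≤ v := by
      intro w hw
      rcases List.mem_cons.mp ((hmem w).mpr hw) with rfl | h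
      · exact le_rfl
      · exact le_of_lt (List.rel_of_pairwise_cons hvs h)
    set l1 := l.takeWhile (fun s => g s == v) with hl1
    set l2 := l.dropWhile (fun s => g s == v) with hl2
    have hsplit : l1 ++ l2 = l := List.takeWhile_append_dropWhile
    have f1 : ∀ s ∈ l1, g s = v := by
      intro s hs
      rw [hl1] at hs
      exact beq_iff_eq.mp (List.mem_takeWhile_imp (p := fun s => g s == v) hs)
    have hl2pw : List.Pairwise (fun a b => g b ≤ g a) l2 := by
      have hpw := hsplit ▸ hl
      exact (List.pairwise_append.mp hpw).2.1
    have f2 : ∀ s ∈ l2, g s < v := by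
      rw [hl2]
      exact pv_dropWhile_lt g l v hl hv_max
    have e1 : l.filter (fun s => g s == v) = l1 := by
      rw [← hsplit, List.filter_append]
      have ha : l1.filter (fun s => g s == v) = l1 :=
        List.filter_eq_self.mpr (fun s hs => beq_iff_eq.mpr (f1 s hs))
      have hb : l2.filter (fun s => g s == v) = [] := by
        rw [List.filter_eq_nil_iff]
        intro s hs
        exact fun hbb => absurd (beq_iff_eq.mp hbb) (ne_of_lt (f2 s hs))
      rw [ha, hb, List.append_nil]
    have e2 : ∀ v' ∈ vs', l.filter (fun s => g s == v') = l2.filter (fun s => g s == v') := by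
      intro v' hv'
      have hlt : v' < v := List.rel_of_pairwise_cons hvs hv'
      rw [← hsplit, List.filter_append]
      have ha : l1.filter (fun s => g s == v') = [] := by
        rw [List.filter_eq_nil_iff]
        intro s hs hb
        rw [f1 s hs] at hb
        exact absurd (beq_iff_eq.mp hb) (ne_of_gt hlt)
      rw [ha, List.nil_append]
    have hmem' : ∀ v', v' ∈ vs' ↔ v' ∈ l2.map g := by
      intro v'
      constructor
      · intro hv'
        have hlt : v' < v := List.rel_of_pairwise_cons hvs hv'
        have hin : v' ∈ l.map g := (hmem v').mp (List.mem_cons_of_mem v hv')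
        rw [← hsplit, List.map_append] at hin
        rcases List.mem_append.mp hin with h | h
        · obtain ⟨s, hs, rfl⟩ := List.mem_map.mp h
          exact absurd (f1 s hs) (ne_of_lt hlt)
        · exact h
      · intro hv'
        obtain ⟨s, hs, rfl⟩ := List.mem_map.mp hv'
        have hin : g s ∈ l.map g := by
          rw [← hsplit]
          exact List.mem_map_of_mem (List.mem_append_right _ hs)
        rcases List.mem_cons.mp ((hmem (g s)).mpr hin) with h | h
        · exact absurd h (ne_of_lt (f2 s hs))
        · exact h
    calc (v :: vs').flatMap (fun w => l.filter (fun s => g s == w))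
        = l.filter (fun s => g s == v) ++ vs'.flatMap (fun w => l.filter (fun s => g s == w)) := by
          simp [List.flatMap_cons]
      _ = l1 ++ vs'.flatMap (fun w => l2.filter (fun s => g s == w)) := by
          rw [e1, pv_flatMap_congr _ _ _ e2]
      _ = l1 ++ l2 := by
          rw [ih l2 hl2pw (hvs.sublist (List.sublist_cons_self v vs')) hmem']
      _ = l := hsplit

theorem pv_sorted_ofList_gt (m : List Int) :
    List.Pairwise (fun a b => b < a) (PySem.List.sorted (PySem.Set.ofList m) (fun x => x) true) := by
  have hperm1 : (PySem.List.sorted (PySem.Set.ofList m) (fun x => x) true).Perm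
      (PySem.Set.ofList m) := PySem.List.sorted_perm _ _ _
  have hnd : (PySem.List.sorted (PySem.Set.ofList m) (fun x => x) true).Nodup :=
    (hperm1.nodup_iff).mpr (PySem.Set.nodup_ofList m)
  have hpw : List.Pairwise (fun a b => b ≤ a)
      (PySem.List.sorted (PySem.Set.ofList m) (fun x => x) true) :=
    PySem.List.sorted_pairwise_rev _ _
  refine (hpw.and hnd).imp ?_
  rintro a b ⟨hle, hne⟩
  exact lt_of_le_of_ne hle (Ne.symm hne)

theorem pv_pairwise_of_adjacent (g : String → Int) (l : List String)
    (h : ∀ j, (hj : j + 1 < l.length) → g l[j+1] ≤ g l[j]) :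
    List.Pairwise (fun a b => g b ≤ g a) l := by
  rw [List.pairwise_iff_getElem]
  intro i j hi hj hij
  have key : ∀ k (hk : i + k < l.length), g (l[i+k]'hk) ≤ g (l[i]'hi) := by
    intro k
    induction k with
    | zero => intro hk; exact le_rfl
    | succ n ihn =>
      intro hk
      have h1 : i + n < l.length := by omega
      have h2 := h (i + n) (by omega)
      have h3 := ihn h1
      have hcast : g (l[i + (n+1)]'hk) = g (l[(i+n) + 1]'(by omega)) := by
        congr 1
      calc g (l[i + (n+1)]'hk) = g (l[(i+n) + 1]'(by omega)) := hcast
        _ ≤ g (l[i+n]'h1) := h2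
        _ ≤ g (l[i]'hi) := h3
  obtain ⟨k, rfl⟩ : ∃ k, j = i + k := ⟨j - i, by omega⟩
  exact key k hj

theorem pvC_of_pairwise (l : List String)
    (h : List.Pairwise (fun a b => pvRunB b ≤ pvRunB a) l) : pvC l = l := by
  unfold pvC
  apply pv_flatMap_filter pvRunB _ l h (pv_sorted_ofList_gt _)
  intro v
  rw [PySem.List.mem_sorted, PySem.Set.mem_ofList]

theorem pvLoopA_main (d : PySem.Dict String Int) (l : List String) (i : Nat)
    (hmem : ∀ x ∈ l, d.getD x 0 = pvRunB x)
    (hpre : ∀ j, j + 1 ≤ i → ∀ (hj : j + 1 < l.length), pvRunB l[j+1] ≤ pvRunB l[j]) :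
    pvC (pvLoopA d l i) = pvC l ∧
      List.Pairwise (fun a b => pvRunB b ≤ pvRunB a) (pvLoopA d l i) := by
  induction l, i using pvLoopA.induct d with
  | case1 l i hlt hcond ih =>
    have h1 : i + 1 < l.length := by omega
    have ha : l.getD i "" ∈ l := by
      rw [List.getD_eq_getElem l "" (by omega : i < l.length)]
      exact List.getElem_mem _
    have hb : l.getD (i+1) "" ∈ l := by
      rw [List.getD_eq_getElem l "" h1]
      exact List.getElem_mem _
    have hkey : pvRunB (l.getD i "") < pvRunB (l.getD (i+1) "") := by
      rw [← hmem _ ha, ← hmem _ hb]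
      exact hcond
    have hswap := pv_set_swap "" l i h1
    have hdecomp := pv_decomp "" l i h1
    have hmem' : ∀ x ∈ (l.set i (l.getD (i+1) "")).set (i+1) (l.getD i ""),
        d.getD x 0 = pvRunB x := by
      intro x hx
      apply hmem
      rw [hswap] at hx
      rw [hdecomp]
      rcases List.mem_append.mp hx with h | h
      · exact List.mem_append_left _ h
      · refine List.mem_append_right _ ?_
        rcases List.mem_cons.mp h with rfl | h
        · exact List.mem_cons_of_mem _ List.mem_cons_self
        · rcases List.mem_cons.mp h with rfl | h
          · exact List.mem_cons_self
          · exact List.mem_cons_of_mem _ (List.mem_cons_of_mem _ h)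
    have hpre' : ∀ j, j + 1 ≤ 0 →
        ∀ (hj : j + 1 < ((l.set i (l.getD (i+1) "")).set (i+1) (l.getD i "")).length),
        pvRunB ((l.set i (l.getD (i+1) "")).set (i+1) (l.getD i ""))[j+1]
          ≤ pvRunB ((l.set i (l.getD (i+1) "")).set (i+1) (l.getD i ""))[j] := by
      intro j hj
      omega
    obtain ⟨ihC, ihP⟩ := ih hmem' hpre'
    have hCswap : pvC ((l.set i (l.getD (i+1) "")).set (i+1) (l.getD i "")) = pvC l := by
      rw [hswap]
      conv_rhs => rw [hdecomp]
      exact pvC_swap _ _ _ _ (ne_of_lt hkey)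
    constructor
    · rw [pvLoopA]
      simp only [dif_pos hlt, if_pos hcond]
      rw [ihC, hCswap]
    · rw [pvLoopA]
      simp only [dif_pos hlt, if_pos hcond]
      exact ihP
  | case2 l i hlt hcond ih =>
    have h1 : i + 1 < l.length := by omega
    have hpre' : ∀ j, j + 1 ≤ i + 1 → ∀ (hj : j + 1 < l.length),
        pvRunB l[j+1] ≤ pvRunB l[j] := by
      intro j hj hjl
      by_cases hji : j + 1 ≤ i
      · exact hpre j hji hjl
      · have hjeq : j = i := by omega
        subst hjeq
        have hc : ¬ pvRunB l[j+1] > pvRunB l[j] := by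
          rw [← hmem _ (List.getElem_mem _), ← hmem _ (List.getElem_mem _)]
          rw [← List.getD_eq_getElem l "" hjl, ← List.getD_eq_getElem l "" (by omega : j < l.length)]
          exact hcond
        omega
    obtain ⟨ihC, ihP⟩ := ih hmem hpre'
    constructor
    · rw [pvLoopA]
      simp only [dif_pos hlt, if_neg hcond]
      exact ihC
    · rw [pvLoopA]
      simp only [dif_pos hlt, if_neg hcond]
      exact ihP
  | case3 l i hlt =>
    rw [pvLoopA]
    simp only [dif_neg hlt]
    refine ⟨by trivial, pv_pairwise_of_adjacent pvRunB l ?_⟩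
    intro j hj
    exact hpre j (by omega) hj

theorem pvDictA_getD (seq : List String) (x : String) (hx : x ∈ seq) :
    (pvDictA seq).getD x 0 = pvKeyA x := by
  unfold pvDictA
  exact pvDict_getD_foldl pvKeyA seq x PySem.Dict.empty (Or.inl hx)

theorem pvAlt_eq_C (seq : List String) : sort_strings_by_vowels_alt seq = pvC seq := by
  unfold sort_strings_by_vowels_alt pvC
  rw [PySem.List.foldl_append_eq_flatMap
    (g := fun v => ((seq.zip (seq.map pvRunB)).filter (fun p => p.2 == v)).map Prod.fst)]
  rw [List.nil_append]
  have hfun : (fun v => ((seq.zip (seq.map pvRunB)).filter (fun p => p.2 == v)).map Prod.fst)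
      = (fun v => seq.filter (fun s => pvRunB s == v)) := by
    funext v; exact pv_zip_filter pvRunB seq v
  rw [hfun]

-- ===== VERDICT (by name: the statement is the Claim_ definition above) =====
theorem sort_strings_by_vowels_spec : Claim_equal_sort_strings_by_vowels := by
  intro seq _
  unfold Spec_sort_strings_by_vowels
  have hmem : ∀ x ∈ seq, (pvDictA seq).getD x 0 = pvRunB x := by
    intro x hx; rw [pvDictA_getD seq x hx, pvKey_eq]
  have h := pvLoopA_main (pvDictA seq) seq 0 hmem (by omega)
  have hfin : pvC (pvLoopA (pvDictA seq) seq 0) = pvLoopA (pvDictA seq) seq 0 :=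
    pvC_of_pairwise _ h.2
  show pvLoopA (pvDictA seq) seq 0 = _
  rw [pvAlt_eq_C, ← h.1, hfin]
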